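-- pv_equiv track=rewrite | github.com/sykwon/sigmod2025like | src/LPLM/extension.py | parse_like_query
-- ===== SOURCE A (Python) =====
-- def parse_like_query(qry, split_beta=False):
--     parsed = []
--     curr = qry[0]
--     is_wild = curr == "_" or curr == "%"
--     for ch in qry[1:]:
--         if ch == "_" or ch == "%":
--             if is_wild:
--                 curr += ch
--             else:
--                 parsed.append(curr)
--                 is_wild = True
--                 curr = ch
--         else:
--             if is_wild:
--                 parsed.append(curr)
--                 is_wild = False
--                 curr = ch
--             else:
--                 curr += ch
--     parsed.append(curr)
--     if split_beta:
--         parsed_bak = parsed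
--         parsed = []
--         for token in parsed_bak:
--             if "%" in token or "_" in token:
--                 parsed.append(token)
--             else:
--                 parsed.extend(list(token))
--     return parsed
-- ===== SOURCE B (Python) =====
-- def parse_like_query(qry, split_beta=False):
--     parsed = []
--     i = 0
--     n = len(qry)
--     while i < n:
--         wild = qry[i] in "_%"
--         j = i + 1
--         while j < n and (qry[j] in "_%") == wild:
--             j += 1
--         if split_beta and not wild:
--             parsed.extend(qry[i:j])
--         else:
--             parsed.append(qry[i:j])
--         i = j
--     return parsed
-- ===== Notes on version B (the rewrite author's own statement) =====
-- stated objective: alternative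
-- what changed: Replaces A's char-by-char state machine plus a separate split_beta post-pass with a single run-scanning loop that slices each maximal wildcard/literal run directly and splits literal runs inline.
import Mathlib
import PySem

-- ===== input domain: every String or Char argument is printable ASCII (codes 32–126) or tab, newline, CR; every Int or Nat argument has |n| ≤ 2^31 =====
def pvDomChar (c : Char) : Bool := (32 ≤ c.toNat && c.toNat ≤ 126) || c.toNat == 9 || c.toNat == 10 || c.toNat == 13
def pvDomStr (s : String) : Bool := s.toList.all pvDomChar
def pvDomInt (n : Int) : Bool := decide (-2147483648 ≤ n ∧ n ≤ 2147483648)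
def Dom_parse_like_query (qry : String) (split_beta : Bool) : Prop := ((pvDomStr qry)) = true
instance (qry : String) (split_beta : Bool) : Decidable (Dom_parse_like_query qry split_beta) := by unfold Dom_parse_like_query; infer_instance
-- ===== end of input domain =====

-- B replaces A's char-by-char state machine + separate split_beta post-pass with one
-- run-scanning loop (alternative decomposition, same cost); A raises on "" (excluded by Pre_).

-- ===== PORT A =====
-- A's loop body over qry[1:], state = (parsed, is_wild, curr); curr kept as List Char
def pvAStep (st : List (List Char) × Bool × List Char) (ch : Char) :
    List (List Char) × Bool × List Char :=
  let (parsed, is_wild, curr) := st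
  if ch == '_' || ch == '%' then
    if is_wild then (parsed, true, curr ++ [ch]) else (parsed ++ [curr], true, [ch])
  else
    if is_wild then (parsed ++ [curr], false, [ch]) else (parsed, false, curr ++ [ch])

def parse_like_query (qry : String) (split_beta : Bool) : List String :=
  match qry.toList with
  | [] => []  -- unreachable under Pre_ (Python A raises IndexError on "")
  | c :: rest =>
    let st := rest.foldl pvAStep ([], (c == '_' || c == '%'), [c])
    let parsed := st.1 ++ [st.2.2]
    let parsed2 :=
      if split_beta then
        parsed.foldl (fun acc token =>
          if token.contains '%' || token.contains '_' then acc ++ [token]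
          else acc ++ token.map (fun ch => [ch])) []
      else parsed
    parsed2.map String.mk

-- ===== PORT B =====
def pvIsWild (c : Char) : Bool := c == '_' || c == '%'   -- B's  c in "_%"

-- B's outer while loop: slice the maximal run starting at the head, emit it, continue
def pvGo (split_beta : Bool) : List Char → List (List Char)
  | [] => []
  | c :: cs =>
    let w := pvIsWild c
    let run := c :: cs.takeWhile (fun x => pvIsWild x == w)
    let rest := cs.dropWhile (fun x => pvIsWild x == w)
    if split_beta && !w then run.map (fun x => [x]) ++ pvGo split_beta rest
    else run :: pvGo split_beta rest
termination_by l => l.length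
decreasing_by all_goals (simp only [List.length_cons]; exact Nat.lt_succ_of_le (List.length_dropWhile_le ..))

def parse_like_query_alt (qry : String) (split_beta : Bool) : List String :=
  (pvGo split_beta qry.toList).map String.mk

-- ===== PRECONDITION & SPEC =====
-- Pre_ excludes exactly the empty string, on which Python A raises IndexError (qry[0]).
def Pre_parse_like_query (qry : String) (split_beta : Bool) : Prop := qry ≠ ""
instance (qry : String) (split_beta : Bool) : Decidable (Pre_parse_like_query qry split_beta) := by unfold Pre_parse_like_query; infer_instance
def pvWitness_parse_like_query : String × Bool := ("ab%_c", true)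

def Spec_parse_like_query (qry : String) (split_beta : Bool) (out : List String) : Prop := out = parse_like_query_alt qry split_beta
instance (qry : String) (split_beta : Bool) (out : List String) : Decidable (Spec_parse_like_query qry split_beta out) := by unfold Spec_parse_like_query; infer_instance

-- ===== CLAIM (what is proved, stated in full; the proofs are below) =====
def Claim_equal_parse_like_query : Prop := ∀ (qry : String) (split_beta : Bool), Dom_parse_like_query qry split_beta → Pre_parse_like_query qry split_beta → Spec_parse_like_query qry split_beta (parse_like_query qry split_beta)

-- ===== LEMMAS AND PROOFS =====

-- A's loop restated as direct recursion on the remaining input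
def pvGlue (curr : List Char) (w : Bool) : List Char → List (List Char)
  | [] => [curr]
  | ch :: t =>
    if (ch == '_' || ch == '%') == w then pvGlue (curr ++ [ch]) w t
    else curr :: pvGlue [ch] (ch == '_' || ch == '%') t

-- maximal-run decomposition (B with split_beta off)
def pvGroups : List Char → List (List Char)
  | [] => []
  | c :: cs =>
    (c :: cs.takeWhile (fun x => pvIsWild x == pvIsWild c)) ::
      pvGroups (cs.dropWhile (fun x => pvIsWild x == pvIsWild c))
termination_by l => l.length
decreasing_by simp only [List.length_cons]; exact Nat.lt_succ_of_le (List.length_dropWhile_le ..)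

lemma foldl_eq_glue (l : List Char) (parsed : List (List Char)) (w : Bool) (curr : List Char) :
    (l.foldl pvAStep (parsed, w, curr)).1 ++ [(l.foldl pvAStep (parsed, w, curr)).2.2]
      = parsed ++ pvGlue curr w l := by
  induction l generalizing parsed w curr with
  | nil => simp [pvGlue]
  | cons ch t ih =>
    simp only [List.foldl_cons, pvAStep, pvGlue]
    by_cases hw : (ch == '_' || ch == '%') = true
    · cases w with
      | true => simp [hw, ih]
      | false => simp [hw, ih]
    · simp only [Bool.not_eq_true] at hw
      cases w with
      | true => simp [hw, ih]
      | false => simp [hw, ih]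

lemma glue_eq_groups (l : List Char) (curr : List Char) (w : Bool) :
    pvGlue curr w l
      = (curr ++ l.takeWhile (fun x => pvIsWild x == w)) ::
          pvGroups (l.dropWhile (fun x => pvIsWild x == w)) := by
  induction l generalizing curr w with
  | nil => simp [pvGlue, pvGroups]
  | cons ch t ih =>
    simp only [pvGlue]
    by_cases hw : (pvIsWild ch) = w
    · have hw' : ((ch == '_' || ch == '%') == w) = true := by
        simp [pvIsWild] at hw; simp [hw]
      rw [if_pos hw']
      rw [ih]
      simp [pvIsWild, hw']
    · have hw' : ((ch == '_' || ch == '%') == w) = false := by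
        simp [pvIsWild] at hw; simp [hw]
      rw [if_neg (by simp [hw'])]
      rw [ih]
      simp only [List.takeWhile_cons, List.dropWhile_cons, pvIsWild, hw']
      simp [pvGroups, pvIsWild]

lemma glue_head_eq_groups (c : Char) (l : List Char) :
    pvGlue [c] (c == '_' || c == '%') l = pvGroups (c :: l) := by
  rw [glue_eq_groups]
  simp [pvGroups, pvIsWild]

lemma go_false_eq_groups (l : List Char) : pvGo false l = pvGroups l := by
  induction l using pvGroups.induct with
  | case1 => simp [pvGo, pvGroups]
  | case2 c cs ih =>
    rw [pvGo, pvGroups]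
    simp [ih]

-- characters of a run produced by pvGroups all share the head's wildness
lemma explode_groups (l : List Char) : ∀ acc : List (List Char),
    (pvGroups l).foldl (fun acc token =>
        if token.contains '%' || token.contains '_' then acc ++ [token]
        else acc ++ token.map (fun ch => [ch])) acc
      = acc ++ pvGo true l := by
  induction l using pvGroups.induct with
  | case1 => intro acc; simp [pvGroups, pvGo]
  | case2 c cs ih =>
    intro acc
    rw [pvGroups, List.foldl_cons]
    by_cases hw : pvIsWild c = true
    · have hc : c = '_' ∨ c = '%' := by
        simpa only [pvIsWild, Bool.or_eq_true, beq_iff_eq] using hw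
      have hcont : ((c :: cs.takeWhile fun x => pvIsWild x == pvIsWild c).contains '%'
          || (c :: cs.takeWhile fun x => pvIsWild x == pvIsWild c).contains '_') = true := by
        rcases hc with rfl | rfl <;> simp
      rw [if_pos hcont, ih]
      conv_rhs => rw [pvGo]
      simp [hw]
    · have hall : ∀ x ∈ c :: cs.takeWhile (fun x => pvIsWild x == pvIsWild c),
          pvIsWild x = false := by
        intro x hx
        rcases List.mem_cons.mp hx with rfl | hm
        · simpa using hw
        · have hp := List.mem_takeWhile_imp hm
          simp only [beq_iff_eq] at hp
          rw [hp]; simpa using hw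
      have hcont : ((c :: cs.takeWhile fun x => pvIsWild x == pvIsWild c).contains '%'
          || (c :: cs.takeWhile fun x => pvIsWild x == pvIsWild c).contains '_') = false := by
        simp only [Bool.or_eq_false_iff, List.contains_eq_mem, decide_eq_false_iff_not,
          List.mem_cons, not_or]
        refine ⟨⟨fun h => ?_, fun h => ?_⟩, fun h => ?_, fun h => ?_⟩
        · have := hall c (List.mem_cons_self ..); rw [← h] at this; simp [pvIsWild] at this
        · have := hall '%' (List.mem_cons_of_mem _ h); simp [pvIsWild] at this
        · have := hall c (List.mem_cons_self ..); rw [← h] at this; simp [pvIsWild] at this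
        · have := hall '_' (List.mem_cons_of_mem _ h); simp [pvIsWild] at this
      rw [if_neg (by simp only [hcont]; simp), ih]
      conv_rhs => rw [pvGo]
      simp [hw]

lemma explode_groups_nil (l : List Char) :
    (pvGroups l).foldl (fun acc token =>
        if token.contains '%' || token.contains '_' then acc ++ [token]
        else acc ++ token.map (fun ch => [ch])) []
      = pvGo true l := by
  simpa using explode_groups l []

lemma main_eq (qry : String) (split_beta : Bool) (h : qry ≠ "") :
    parse_like_query qry split_beta = parse_like_query_alt qry split_beta := by
  unfold parse_like_query parse_like_query_alt
  cases hl : qry.toList with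
  | nil => exact absurd (String.toList_eq_nil_iff.mp hl) h
  | cons c rest =>
    have hfold := foldl_eq_glue rest [] (c == '_' || c == '%') [c]
    simp only [List.nil_append] at hfold
    cases split_beta with
    | false =>
      simp only [hfold, glue_head_eq_groups]
      rw [if_neg (by simp)]
      exact congrArg (List.map String.mk) (go_false_eq_groups _).symm
    | true =>
      simp only [hfold, glue_head_eq_groups, if_true]
      exact congrArg (List.map String.mk) (explode_groups_nil _)

-- ===== VERDICT (by name: the statement is the Claim_ definition above) =====
theorem parse_like_query_spec : Claim_equal_parse_like_query := by
  intro qry split_beta _ hpre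
  unfold Spec_parse_like_query
  exact main_eq qry split_beta hpre
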